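-- pv_equiv track=rewrite | github.com/ccubc/coding_test_prep | leetcode_algorithm/leetcode_medium_54.py | skirtTraverse
-- ===== SOURCE A (Python) =====
-- def skirtTraverse(matrix):
--     # len(matrix) must be positive
--     # len(matrix[0]) must also be positive
--     ans = []
--     # traverse upper boundary
--     i = 0
--     for j in range(len(matrix[0])):
--         ans.append(matrix[i][j])
--     # traverse right boundary
--     j = len(matrix[0]) - 1
--     for i in range(1, len(matrix)):
--         ans.append(matrix[i][j])
--     # traverse lower boundary
--     i = len(matrix) - 1
--     if i > 0:
--         for j in range(len(matrix[0])-2, -1, -1):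
--             ans.append(matrix[i][j])
--     # traverse left boundary
--     if len(matrix[0]) > 1:
--         j = 0
--         for i in range(len(matrix)-2, 0, -1):
--             ans.append(matrix[i][j])
--     return ans
-- ===== SOURCE B (Python) =====
-- def skirtTraverse(matrix):
--     # One arithmetic perimeter walk instead of four boundary loops.
--     m, n = len(matrix), len(matrix[0])
--     if m == 1:
--         return list(matrix[0])
--     if n == 1:
--         return [row[0] for row in matrix]
--     p = 2 * (m + n) - 4
--     out = []
--     for k in range(p):
--         if k < n:
--             i, j = 0, k
--         elif k < n + m - 1:
--             i, j = k - n + 1, n - 1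
--         elif k < 2 * n + m - 2:
--             i, j = m - 1, 2 * n + m - 3 - k
--         else:
--             i, j = 2 * (m + n) - 4 - k, 0
--         out.append(matrix[i][j])
--     return out
-- ===== Notes on version B (the rewrite author's own statement) =====
-- stated objective: alternative
-- what changed: Replaced A's four separate boundary for-loops (top, right, bottom, left, each with its own guard) by a single loop over the perimeter index k in range(2*(m+n)-4) with a closed-form map from k to the cell (i,j), plus direct returns for the single-row and single-column cases.
-- outside the precondition, e.g. on skirtTraverse([[], [5]]): A returns [5], B returns []
import Mathlib
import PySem

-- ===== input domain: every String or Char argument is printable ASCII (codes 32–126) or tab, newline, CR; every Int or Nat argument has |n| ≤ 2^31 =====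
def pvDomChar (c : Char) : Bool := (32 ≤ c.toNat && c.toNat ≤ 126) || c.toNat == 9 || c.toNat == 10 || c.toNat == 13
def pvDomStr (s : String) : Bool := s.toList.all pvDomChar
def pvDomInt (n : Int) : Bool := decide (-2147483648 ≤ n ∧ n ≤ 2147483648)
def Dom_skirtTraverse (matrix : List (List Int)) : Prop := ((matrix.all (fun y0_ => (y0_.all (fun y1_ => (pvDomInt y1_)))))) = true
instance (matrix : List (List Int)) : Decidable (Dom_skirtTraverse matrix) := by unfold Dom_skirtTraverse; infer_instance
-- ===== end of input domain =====

-- B replaces A's four separate boundary loops by a single perimeter-index loop with a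
-- closed-form index→cell map (objective: alternative decomposition, same cost).

-- matrix[i][j]; exact to Python under Pre_, where every accessed index is in range
def pvCell (matrix : List (List Int)) (i j : Int) : Int :=
  PySem.List.pyGetD (PySem.List.pyGetD matrix i []) j 0

-- ===== PORT A =====
def skirtTraverse (matrix : List (List Int)) : List Int :=
  let m : Int := PySem.List.len matrix
  let n : Int := PySem.List.len (PySem.List.pyGetD matrix 0 [])
  -- upper boundary: i = 0, for j in range(len(matrix[0]))
  let ans := (PySem.List.pyRange 0 n 1).foldl (fun acc j => acc ++ [pvCell matrix 0 j]) []
  -- right boundary: j = n - 1, for i in range(1, len(matrix))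
  let ans := (PySem.List.pyRange 1 m 1).foldl (fun acc i => acc ++ [pvCell matrix i (n - 1)]) ans
  -- lower boundary: i = m - 1, if i > 0: for j in range(n-2, -1, -1)
  let ans := if m - 1 > 0 then
      (PySem.List.pyRange (n - 2) (-1) (-1)).foldl (fun acc j => acc ++ [pvCell matrix (m - 1) j]) ans
    else ans
  -- left boundary: if n > 1: j = 0, for i in range(m-2, 0, -1)
  let ans := if n > 1 then
      (PySem.List.pyRange (m - 2) 0 (-1)).foldl (fun acc i => acc ++ [pvCell matrix i 0]) ans
    else ans
  ans

-- ===== PORT B =====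
def skirtTraverse_alt (matrix : List (List Int)) : List Int :=
  let m : Int := PySem.List.len matrix
  let n : Int := PySem.List.len (PySem.List.pyGetD matrix 0 [])
  if m = 1 then PySem.List.pyGetD matrix 0 []
  else if n = 1 then matrix.map (fun row => PySem.List.pyGetD row 0 0)
  else
    let p : Int := 2 * (m + n) - 4
    (PySem.List.pyRange 0 p 1).foldl (fun acc k =>
      let ij : Int × Int :=
        if k < n then (0, k)
        else if k < n + m - 1 then (k - n + 1, n - 1)
        else if k < 2 * n + m - 2 then (m - 1, 2 * n + m - 3 - k)
        else (2 * (m + n) - 4 - k, 0)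
      acc ++ [pvCell matrix ij.1 ij.2]) []

-- ===== PRECONDITION & SPEC =====
-- Pre_ excludes the empty matrix and (when there are ≥2 rows) matrices whose first row is
-- empty or longer than some other row: there A either raises IndexError, or — first row
-- empty, all later rows nonempty — its nonempty output is an accident of Python's
-- negative-index (-1) wraparound (B returns [] there).
def Pre_skirtTraverse (matrix : List (List Int)) : Prop :=
  matrix ≠ [] ∧
  (matrix.length = 1 ∨
    (0 < (matrix.headD []).length ∧ ∀ row ∈ matrix, (matrix.headD []).length ≤ row.length))
instance (matrix : List (List Int)) : Decidable (Pre_skirtTraverse matrix) := by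
  unfold Pre_skirtTraverse; infer_instance
def pvWitness_skirtTraverse : List (List Int) := [[1, 2, 3], [4, 5, 6], [7, 8, 9]]

def Spec_skirtTraverse (matrix : List (List Int)) (out : List Int) : Prop := out = skirtTraverse_alt matrix
instance (matrix : List (List Int)) (out : List Int) : Decidable (Spec_skirtTraverse matrix out) := by unfold Spec_skirtTraverse; infer_instance

-- ===== CLAIM (what is proved, stated in full; the proofs are below) =====
def Claim_equal_skirtTraverse : Prop := ∀ (matrix : List (List Int)), Dom_skirtTraverse matrix → Pre_skirtTraverse matrix → Spec_skirtTraverse matrix (skirtTraverse matrix)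

-- ===== LEMMAS AND PROOFS =====

theorem pv_case3 (mat : List (List Int)) (r0 : List Int)
    (hhead : PySem.List.pyGetD mat 0 [] = r0)
    (hM : 2 ≤ mat.length) (hN : 2 ≤ r0.length) :
    skirtTraverse mat = skirtTraverse_alt mat := by
  simp only [skirtTraverse, skirtTraverse_alt, PySem.List.len_eq, hhead]
  have hm : (2:Int) ≤ (mat.length : Int) := by exact_mod_cast hM
  have hn : (2:Int) ≤ (r0.length : Int) := by exact_mod_cast hN
  generalize hg1 : ((mat.length : ℕ) : Int) = m at hm ⊢
  generalize hg2 : ((r0.length : ℕ) : Int) = n at hn ⊢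
  rw [if_pos (show m - 1 > 0 by omega), if_pos (show n > 1 by omega),
      if_neg (show ¬ m = 1 by omega), if_neg (show ¬ n = 1 by omega)]
  simp only [PySem.List.foldl_append_singleton_eq_map, List.nil_append]
  have hsplit : PySem.List.pyRange 0 (2 * (m + n) - 4) 1
      = ((PySem.List.pyRange 0 n 1 ++ PySem.List.pyRange n (n + m - 1) 1)
          ++ PySem.List.pyRange (n + m - 1) (2 * n + m - 2) 1)
          ++ PySem.List.pyRange (2 * n + m - 2) (2 * (m + n) - 4) 1 := by
    rw [← PySem.List.pyRange_one_append 0 n (n + m - 1) (by omega) (by omega),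
        ← PySem.List.pyRange_one_append 0 (n + m - 1) (2 * n + m - 2) (by omega) (by omega),
        ← PySem.List.pyRange_one_append 0 (2 * n + m - 2) (2 * (m + n) - 4) (by omega) (by omega)]
  rw [hsplit, List.map_append, List.map_append, List.map_append]
  congr 1
  · congr 1
    · congr 1
      · -- top chunk
        apply List.map_congr_left
        intro k hk
        rw [PySem.List.mem_pyRange_one] at hk
        rw [if_pos hk.2]
      · -- right chunk
        rw [PySem.List.pyRange_one 1 m, PySem.List.pyRange_one n (n + m - 1),
            show (n + m - 1 - n).toNat = (m - 1).toNat by omega]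
        simp only [List.map_map]
        apply List.map_congr_left
        intro t ht
        rw [List.mem_range] at ht
        simp only [Function.comp]
        rw [if_neg (show ¬ n + (t:Int) < n by omega), if_pos (show n + (t:Int) < n + m - 1 by omega)]
        show pvCell mat (1 + (t:Int)) (n - 1) = pvCell mat (n + (t:Int) - n + 1) (n - 1)
        rw [show n + (t:Int) - n + 1 = 1 + (t:Int) by ring]
    · -- bottom chunk
      rw [PySem.List.pyRange_neg_one (n - 2) (-1), PySem.List.pyRange_one (n + m - 1) (2 * n + m - 2),
          show (2 * n + m - 2 - (n + m - 1)).toNat = (n - 2 - (-1)).toNat by omega]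
      simp only [List.map_map]
      apply List.map_congr_left
      intro t ht
      rw [List.mem_range] at ht
      simp only [Function.comp]
      rw [if_neg (show ¬ n + m - 1 + (t:Int) < n by omega),
          if_neg (show ¬ n + m - 1 + (t:Int) < n + m - 1 by omega),
          if_pos (show n + m - 1 + (t:Int) < 2 * n + m - 2 by omega)]
      show pvCell mat (m - 1) (n - 2 - (t:Int)) = pvCell mat (m - 1) (2 * n + m - 3 - (n + m - 1 + (t:Int)))
      rw [show 2 * n + m - 3 - (n + m - 1 + (t:Int)) = n - 2 - (t:Int) by ring]
  · -- left chunk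
    rw [PySem.List.pyRange_neg_one (m - 2) 0, PySem.List.pyRange_one (2 * n + m - 2) (2 * (m + n) - 4),
        show (2 * (m + n) - 4 - (2 * n + m - 2)).toNat = (m - 2 - 0).toNat by omega]
    simp only [List.map_map]
    apply List.map_congr_left
    intro t ht
    rw [List.mem_range] at ht
    simp only [Function.comp]
    rw [if_neg (show ¬ 2 * n + m - 2 + (t:Int) < n by omega),
        if_neg (show ¬ 2 * n + m - 2 + (t:Int) < n + m - 1 by omega),
        if_neg (show ¬ 2 * n + m - 2 + (t:Int) < 2 * n + m - 2 by omega)]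
    show pvCell mat (m - 2 - (t:Int)) 0 = pvCell mat (2 * (m + n) - 4 - (2 * n + m - 2 + (t:Int))) 0
    rw [show 2 * (m + n) - 4 - (2 * n + m - 2 + (t:Int)) = m - 2 - (t:Int) by ring]


theorem pv_case1 (r0 : List Int) : skirtTraverse [r0] = skirtTraverse_alt [r0] := by
  simp only [skirtTraverse, skirtTraverse_alt, PySem.List.len_eq, PySem.List.pyGetD_zero_cons,
    List.length_cons, List.length_nil]
  norm_num
  rw [← List.flatMap_def, ← List.map_eq_flatMap]
  exact PySem.List.map_pyGetD_pyRange_zero' r0 0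

theorem pv_case2 (mat : List (List Int)) (r0 : List Int)
    (hhead : PySem.List.pyGetD mat 0 [] = r0)
    (hM : 2 ≤ mat.length) (hN : r0.length = 1) :
    skirtTraverse mat = skirtTraverse_alt mat := by
  have hm : (2:Int) ≤ (mat.length : Int) := by exact_mod_cast hM
  simp only [skirtTraverse, skirtTraverse_alt, PySem.List.len_eq, hhead, hN, Nat.cast_one]
  rw [if_neg (show ¬ ((mat.length:Int)) = 1 by omega)]
  rw [if_pos (show ((mat.length:Int)) - 1 > 0 by omega)]
  norm_num
  rw [← List.flatMap_def, ← List.map_eq_flatMap, ← List.flatMap_def, ← List.map_eq_flatMap]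
  conv_rhs => rw [← PySem.List.map_pyGetD_pyRange_zero' mat ([] : List Int)]
  simp only [List.map_map]
  rw [PySem.List.pyRange_one_append 0 1 ((mat.length:Int)) (by omega) (by omega), List.map_append]
  have h01 : PySem.List.pyRange 0 1 1 = [0] := by decide
  rw [h01]
  rfl

theorem pv_headD_cons (r0 : List Int) (rest : List (List Int)) :
    PySem.List.pyGetD (r0 :: rest) 0 [] = r0 := by
  simp [PySem.List.pyGetD_zero_cons]

theorem pv_main (matrix : List (List Int)) (hpre : Pre_skirtTraverse matrix) :
    skirtTraverse matrix = skirtTraverse_alt matrix := by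
  obtain ⟨hne, hcase⟩ := hpre
  cases matrix with
  | nil => exact absurd rfl hne
  | cons r0 rest =>
    cases rest with
    | nil => exact pv_case1 r0
    | cons r1 rest' =>
      have hM : 2 ≤ (r0 :: r1 :: rest').length := by
        simp only [List.length_cons]; omega
      have hpos : 0 < r0.length := by
        rcases hcase with h | ⟨h, _⟩
        · simp only [List.length_cons] at h; omega
        · simpa using h
      by_cases h1 : r0.length = 1
      · exact pv_case2 _ r0 (pv_headD_cons r0 _) hM h1
      · exact pv_case3 _ r0 (pv_headD_cons r0 _) hM (by omega)

-- ===== VERDICT (by name: the statement is the Claim_ definition above) =====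
theorem skirtTraverse_spec : Claim_equal_skirtTraverse := by
  intro matrix _ hpre
  exact pv_main matrix hpre
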